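-- pv_equiv track=rewrite | github.com/answerIII/GraphTheory2022-2023 | 2596.py | checkValidGrid
-- ===== SOURCE A (Python) =====
-- from typing import List
--
-- def checkValidGrid(grid: List[List[int]]) -> bool:
--     # составляем словарь шагов фигуры НомерШага[Координаты]
--     # для каждого шага: если разница с предыдущим по xy = (2,1) или (1,2), то все ок
--     n = len(grid)
--     dict_steps = {}
--     for i in range(n):
--         for j in range(n):
--             dict_steps[grid[i][j]] = [i, j]
--
--     if grid[0][0] != 0:
--         return False
--
--     for step in range(n ** 2 - 1):
--         if step + 1 in dict_steps:
--             x_dif = abs(dict_steps[step][0] - dict_steps[step + 1][0])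
--             y_dif = abs(dict_steps[step][1] - dict_steps[step + 1][1])
--         else:
--             return False
--         if not ((x_dif == 2 and y_dif == 1) or (x_dif == 1 and y_dif == 2)):
--             return False
--     return True
-- ===== SOURCE B (Python) =====
-- def checkValidGrid(grid):
--     # Walk the board like the knight itself: start at (0,0), and at each step
--     # scan the 8 knight moves for the in-bounds cell holding the next number.
--     # No value->position index is built; O(1) extra space.
--     n = len(grid)
--     if grid[0][0] != 0:
--         return False
--     x, y = 0, 0
--     for step in range(n * n - 1):
--         for dx, dy in ((1, 2), (2, 1), (2, -1), (1, -2),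
--                        (-1, -2), (-2, -1), (-2, 1), (-1, 2)):
--             nx, ny = x + dx, y + dy
--             if 0 <= nx < n and 0 <= ny < n and grid[nx][ny] == step + 1:
--                 x, y = nx, ny
--                 break
--         else:
--             return False
--     return True
-- ===== Notes on version B (the rewrite author's own statement) =====
-- stated objective: faster
-- what changed: Replaces A's value->position dictionary plus indexed step loop by simulating the knight itself: walk from (0,0) and at each step probe the 8 knight moves for the in-bounds cell holding the next number, keeping only the current position (no index over the grid is built).
import Mathlib
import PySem

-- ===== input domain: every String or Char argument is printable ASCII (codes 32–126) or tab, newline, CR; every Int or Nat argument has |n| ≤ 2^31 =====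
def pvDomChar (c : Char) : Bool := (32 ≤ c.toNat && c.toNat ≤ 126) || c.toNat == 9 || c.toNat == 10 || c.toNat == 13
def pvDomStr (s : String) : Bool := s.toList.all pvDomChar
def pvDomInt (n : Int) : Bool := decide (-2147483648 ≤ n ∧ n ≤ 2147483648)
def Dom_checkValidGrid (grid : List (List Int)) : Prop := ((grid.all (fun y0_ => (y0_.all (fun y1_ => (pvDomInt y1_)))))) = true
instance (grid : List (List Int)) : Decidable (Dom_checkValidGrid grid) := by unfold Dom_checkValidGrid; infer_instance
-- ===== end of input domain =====

-- B replaces A's value->position dictionary and indexed step loop by walking the board like the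
-- knight itself, probing the 8 knight moves for the next number at each step: no index over the
-- grid is built and invalid grids fail fast (measured faster in a timing run).


-- ===== PORT A =====
-- 'for step in range(n**2 - 1): …' with early returns, as structural recursion over the range list.
-- The inner 'd.get? step = none → false' branch is where Python would raise KeyError; it is
-- unreachable from checkValidGrid (step 0 is guarded by grid[0][0] == 0, step k+1 by the previous iteration).
def loopA (d : PySem.Dict Int (Int × Int)) : List Int → Bool
  | [] => true
  | step :: rest =>
    match d.get? (step + 1) with
    | none => false
    | some p2 =>
      match d.get? step with
      | none => false
      | some p1 =>
        let xdif := |p1.1 - p2.1|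
        let ydif := |p1.2 - p2.2|
        if !((xdif == 2 && ydif == 1) || (xdif == 1 && ydif == 2)) then false
        else loopA d rest

def checkValidGrid (grid : List (List Int)) : Bool :=
  let n : Int := grid.length
  let d : PySem.Dict Int (Int × Int) :=
    (PySem.List.pyRange 0 n 1).foldl (fun d i =>
      (PySem.List.pyRange 0 n 1).foldl (fun d j =>
        d.insert (PySem.List.pyGetD (PySem.List.pyGetD grid i []) j 0) (i, j)) d)
      PySem.Dict.empty
  if PySem.List.pyGetD (PySem.List.pyGetD grid 0 []) 0 0 ≠ 0 then false
  else loopA d (PySem.List.pyRange 0 (n * n - 1) 1)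

-- ===== PORT B =====
-- the tuple of 8 knight moves tried, in Source B's order
def movesB : List (Int × Int) :=
  [(1, 2), (2, 1), (2, -1), (1, -2), (-1, -2), (-2, -1), (-2, 1), (-1, 2)]

-- 'for step in range(n*n - 1): for dx, dy in moves: … break / else: return False',
-- the inner for-break-else as List.find? over the move tuple.
def loopB (grid : List (List Int)) (n : Int) : Int × Int → List Int → Bool
  | _, [] => true
  | pos, step :: rest =>
    match movesB.find? (fun dd =>
        decide (0 ≤ pos.1 + dd.1) && decide (pos.1 + dd.1 < n) &&
        decide (0 ≤ pos.2 + dd.2) && decide (pos.2 + dd.2 < n) &&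
        (PySem.List.pyGetD (PySem.List.pyGetD grid (pos.1 + dd.1) []) (pos.2 + dd.2) 0 == step + 1)) with
    | some dd => loopB grid n (pos.1 + dd.1, pos.2 + dd.2) rest
    | none => false

def checkValidGrid_alt (grid : List (List Int)) : Bool :=
  let n : Int := grid.length
  if PySem.List.pyGetD (PySem.List.pyGetD grid 0 []) 0 0 ≠ 0 then false
  else loopB grid n (0, 0) (PySem.List.pyRange 0 (n * n - 1) 1)

-- ===== PRECONDITION & SPEC =====
-- Pre_ excludes exactly the inputs where A raises IndexError (the empty grid via grid[0][0],
-- and grids having a row shorter than len(grid) via grid[i][j]).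
def Pre_checkValidGrid (grid : List (List Int)) : Prop :=
  grid ≠ [] ∧ ∀ row ∈ grid, grid.length ≤ row.length
instance (grid : List (List Int)) : Decidable (Pre_checkValidGrid grid) := by
  unfold Pre_checkValidGrid; infer_instance
def pvWitness_checkValidGrid : List (List Int) := [[0, 3], [2, 1]]

def Spec_checkValidGrid (grid : List (List Int)) (out : Bool) : Prop := out = checkValidGrid_alt grid
instance (grid : List (List Int)) (out : Bool) : Decidable (Spec_checkValidGrid grid out) := by unfold Spec_checkValidGrid; infer_instance

-- ===== CLAIM (what is proved, stated in full; the proofs are below) =====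
def Claim_equal_checkValidGrid : Prop := ∀ (grid : List (List Int)), Dom_checkValidGrid grid → Pre_checkValidGrid grid → Spec_checkValidGrid grid (checkValidGrid grid)

-- ===== LEMMAS AND PROOFS =====

-- the flattened n×n board as (value, i, j) triples, and A's dict as a fold over it
def cellsOf (grid : List (List Int)) : List (Int × Int × Int) :=
  (List.range grid.length).flatMap (fun i =>
    (List.range grid.length).map (fun j => ((grid.getD i []).getD j 0, (i : Int), (j : Int))))

def dictOf (grid : List (List Int)) : PySem.Dict Int (Int × Int) :=
  (cellsOf grid).foldl (fun d c => d.insert c.1 c.2) PySem.Dict.empty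

def KP (p q : Int × Int) : Prop :=
  (|p.1 - q.1| = 1 ∧ |p.2 - q.2| = 2) ∨ (|p.1 - q.1| = 2 ∧ |p.2 - q.2| = 1)

-- l = [s, s+1, s+2, …]: the shape of the range list both loops consume
inductive IsRange : Int → List Int → Prop
  | nil (s : Int) : IsRange s []
  | cons (s : Int) (t : List Int) : IsRange (s + 1) t → IsRange s (s :: t)

lemma length_cellsOf (grid : List (List Int)) :
    (cellsOf grid).length = grid.length * grid.length := by
  simp [cellsOf, List.length_flatMap]

lemma mem_cellsOf {grid : List (List Int)} {c : Int × Int × Int} :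
    c ∈ cellsOf grid ↔ ∃ i < grid.length, ∃ j < grid.length,
      c = ((grid.getD i []).getD j 0, (i : Int), (j : Int)) := by
  simp [cellsOf, List.mem_flatMap, List.mem_map, List.mem_range, eq_comm]

-- generic dict-fold lemmas

lemma get?_foldl_not_mem (l : List (Int × Int × Int)) (d0 : PySem.Dict Int (Int × Int)) (v : Int)
    (hv : v ∉ l.map (·.1)) :
    (l.foldl (fun d c => d.insert c.1 c.2) d0).get? v = d0.get? v := by
  induction l generalizing d0 with
  | nil => rfl
  | cons a t ih =>
    simp only [List.map_cons, List.mem_cons, not_or] at hv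
    rw [List.foldl_cons, ih _ hv.2, PySem.Dict.get?_insert_of_ne (hne := hv.1)]

lemma get?_foldl_mem (l : List (Int × Int × Int)) (d0 : PySem.Dict Int (Int × Int))
    (c : Int × Int × Int) (hc : c ∈ l) (hnd : (l.map (·.1)).Nodup) :
    (l.foldl (fun d c => d.insert c.1 c.2) d0).get? c.1 = some c.2 := by
  induction l generalizing d0 with
  | nil => cases hc
  | cons a t ih =>
    simp only [List.map_cons, List.nodup_cons] at hnd
    rcases List.mem_cons.1 hc with rfl | hct
    · rw [List.foldl_cons, get?_foldl_not_mem _ _ _ hnd.1]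
      exact PySem.Dict.get?_insert_self _ _ _
    · rw [List.foldl_cons]; exact ih _ hct hnd.2

lemma get?_foldl_some_mem (l : List (Int × Int × Int)) (d0 : PySem.Dict Int (Int × Int))
    (v : Int) (p : Int × Int)
    (h : (l.foldl (fun d c => d.insert c.1 c.2) d0).get? v = some p) :
    (v, p) ∈ l ∨ d0.get? v = some p := by
  induction l generalizing d0 with
  | nil => exact Or.inr h
  | cons a t ih =>
    rw [List.foldl_cons] at h
    rcases ih _ h with hm | hd
    · exact Or.inl (List.mem_cons_of_mem _ hm)
    · rw [PySem.Dict.get?_insert] at hd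
      split_ifs at hd with hva
      · left
        cases hd
        rw [List.mem_cons, hva]
        exact Or.inl Prod.mk.eta
      · exact Or.inr hd

lemma get?_dictOf_mem {grid : List (List Int)} {v : Int} {p : Int × Int}
    (h : (dictOf grid).get? v = some p) : (v, p) ∈ cellsOf grid := by
  rcases get?_foldl_some_mem _ _ _ _ h with hm | hd
  · exact hm
  · rw [PySem.Dict.get?_empty] at hd; cases hd

-- A's loop returns true iff every consecutive step pair is a knight move through the dict
lemma loopA_iff (d : PySem.Dict Int (Int × Int)) (l : List Int) :
    loopA d l = true ↔ ∀ step ∈ l, ∃ p1 p2,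
      d.get? step = some p1 ∧ d.get? (step + 1) = some p2 ∧ KP p1 p2 := by
  induction l with
  | nil => simp [loopA]
  | cons s rest ih =>
    cases h2 : d.get? (s + 1) with
    | none => simp [loopA, h2]
    | some p2 =>
      cases h1 : d.get? s with
      | none =>
        simp only [loopA, h2, h1, List.mem_cons]
        constructor
        · intro h; cases h
        · intro h
          obtain ⟨q1, q2, hq1, _, _⟩ := h s (Or.inl rfl)
          rw [h1] at hq1; cases hq1
      | some p1 =>
        by_cases hk : KP p1 p2
        · have hb : (!((|p1.1 - p2.1| == 2 && |p1.2 - p2.2| == 1) ||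
              (|p1.1 - p2.1| == 1 && |p1.2 - p2.2| == 2))) = false := by
            simp only [KP] at hk
            simp only [Bool.not_eq_false', Bool.or_eq_true, Bool.and_eq_true, beq_iff_eq]
            tauto
          simp only [loopA, h2, h1, hb, Bool.false_eq_true, if_false, ih,
            List.mem_cons]
          constructor
          · intro h
            rintro step (rfl | hs)
            · exact ⟨p1, p2, h1, h2, hk⟩
            · exact h step hs
          · intro h step hs; exact h step (Or.inr hs)
        · have hb : (!((|p1.1 - p2.1| == 2 && |p1.2 - p2.2| == 1) ||
              (|p1.1 - p2.1| == 1 && |p1.2 - p2.2| == 2))) = true := by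
            simp only [KP] at hk
            simp only [Bool.not_eq_true', Bool.or_eq_false_iff, Bool.and_eq_false_iff, beq_eq_false_iff_ne, ne_eq]
            tauto
          simp only [loopA, h2, h1, hb, if_true]
          constructor
          · intro h; cases h
          · intro h
            obtain ⟨q1, q2, hq1, hq2, hq⟩ := h s (List.mem_cons_self)
            rw [h1] at hq1; rw [h2] at hq2
            cases hq1; cases hq2
            exact absurd hq hk

-- B's find?-predicate holds for a move exactly when the target cell is on the board with the next value
lemma predB_iff (grid : List (List Int)) (s : Int) (q : Int × Int) :
    ((decide (0 ≤ q.1) && decide (q.1 < (grid.length : Int)) &&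
      decide (0 ≤ q.2) && decide (q.2 < (grid.length : Int)) &&
      (PySem.List.pyGetD (PySem.List.pyGetD grid q.1 []) q.2 0 == s + 1)) = true)
    ↔ (s + 1, q.1, q.2) ∈ cellsOf grid := by
  obtain ⟨q1, q2⟩ := q
  simp only [Bool.and_eq_true, decide_eq_true_eq, beq_iff_eq, mem_cellsOf]
  constructor
  · rintro ⟨⟨⟨⟨h1, h2⟩, h3⟩, h4⟩, h5⟩
    have e1 : q1 = (q1.toNat : Int) := (Int.toNat_of_nonneg h1).symm
    have e2 : q2 = (q2.toNat : Int) := (Int.toNat_of_nonneg h3).symm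
    rw [e1, e2, PySem.List.pyGetD_natCast, PySem.List.pyGetD_natCast] at h5
    refine ⟨q1.toNat, by omega, q2.toNat, by omega, ?_⟩
    simp only [Prod.mk.injEq]
    exact ⟨h5.symm, e1, e2⟩
  · rintro ⟨i, hi, j, hj, heq⟩
    obtain ⟨hv, hq1, hq2⟩ : s + 1 = (grid.getD i []).getD j 0 ∧ q1 = (i : Int) ∧ q2 = (j : Int) := by
      simpa [Prod.mk.injEq] using heq
    subst hq1; subst hq2
    simp only [PySem.List.pyGetD_natCast]
    refine ⟨⟨⟨⟨by positivity, by exact_mod_cast hi⟩, by positivity⟩, by exact_mod_cast hj⟩, hv.symm⟩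

-- the move-tuple geometry
lemma kp_of_move (dd : Int × Int) (hd : dd ∈ movesB) (pos : Int × Int) :
    KP pos (pos.1 + dd.1, pos.2 + dd.2) := by
  fin_cases hd <;>
    simp only [KP, abs_eq (show (0:Int) ≤ 1 by norm_num), abs_eq (show (0:Int) ≤ 2 by norm_num)] <;>
    omega

lemma kp_exists_move (p q : Int × Int) (h : KP p q) :
    ∃ dd ∈ movesB, q.1 = p.1 + dd.1 ∧ q.2 = p.2 + dd.2 := by
  simp only [KP, abs_eq (show (0:Int) ≤ 1 by norm_num), abs_eq (show (0:Int) ≤ 2 by norm_num)] at h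
  rcases h with ⟨h1 | h1, h2 | h2⟩ | ⟨h1 | h1, h2 | h2⟩
  · exact ⟨(-1, -2), by decide, by omega, by omega⟩
  · exact ⟨(-1, 2), by decide, by omega, by omega⟩
  · exact ⟨(1, -2), by decide, by omega, by omega⟩
  · exact ⟨(1, 2), by decide, by omega, by omega⟩
  · exact ⟨(-2, -1), by decide, by omega, by omega⟩
  · exact ⟨(-2, 1), by decide, by omega, by omega⟩
  · exact ⟨(2, -1), by decide, by omega, by omega⟩
  · exact ⟨(2, 1), by decide, by omega, by omega⟩

-- if B's walk succeeds, every next value s+1 occurs on the board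
lemma loopB_mem (grid : List (List Int)) :
    ∀ (l : List Int) (pos : Int × Int),
      loopB grid (grid.length : Int) pos l = true →
      ∀ s ∈ l, (s + 1) ∈ (cellsOf grid).map (·.1) := by
  intro l
  induction l with
  | nil => intro _ _ s hs; cases hs
  | cons s rest ih =>
    intro pos h s' hs'
    rw [loopB] at h
    cases hf : movesB.find? (fun dd =>
        decide (0 ≤ pos.1 + dd.1) && decide (pos.1 + dd.1 < (grid.length : Int)) &&
        decide (0 ≤ pos.2 + dd.2) && decide (pos.2 + dd.2 < (grid.length : Int)) &&
        (PySem.List.pyGetD (PySem.List.pyGetD grid (pos.1 + dd.1) []) (pos.2 + dd.2) 0 == s + 1)) with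
    | none => rw [hf] at h; cases h
    | some dd =>
      rw [hf] at h
      have hpred := List.find?_some hf
      have hcell := (predB_iff grid s (pos.1 + dd.1, pos.2 + dd.2)).1 hpred
      rcases List.mem_cons.1 hs' with rfl | hrest
      · exact List.mem_map.2 ⟨_, hcell, rfl⟩
      · exact ih _ h s' hrest

-- presence of every value 0..n²-1 forces the board's values to be pairwise distinct (pigeonhole)
lemma nodup_vals (grid : List (List Int))
    (hsub : ∀ k : Nat, k < grid.length * grid.length →
      (k : Int) ∈ (cellsOf grid).map (·.1)) :
    ((cellsOf grid).map (·.1)).Nodup := by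
  have hRnd : ((List.range (grid.length * grid.length)).map (fun k : Nat => (k : Int))).Nodup :=
    List.Nodup.map (fun a b h => by exact_mod_cast h) List.nodup_range
  have hRsub : ((List.range (grid.length * grid.length)).map (fun k : Nat => (k : Int))) ⊆
      (cellsOf grid).map (·.1) := by
    intro v hv
    obtain ⟨k, hk, rfl⟩ := List.mem_map.1 hv
    exact hsub k (List.mem_range.1 hk)
  have hvperm := (hRnd.subperm hRsub).perm_of_length_le
    (by simp [List.length_map, length_cellsOf])
  exact hvperm.nodup hRnd

-- the core: with distinct values, B's walk computes exactly A's dict loop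
lemma loopB_eq_loopA (grid : List (List Int))
    (hvnd : ((cellsOf grid).map (·.1)).Nodup) :
    ∀ (l : List Int) (s : Int) (pos : Int × Int),
      IsRange s l → (dictOf grid).get? s = some pos →
      loopB grid (grid.length : Int) pos l = loopA (dictOf grid) l := by
  intro l
  induction l with
  | nil => intro s pos _ _; rfl
  | cons s0 rest ih =>
    intro s pos hr hpos
    obtain ⟨hr'⟩ : ∃ _ : IsRange (s0 + 1) rest, s = s0 := by
      cases hr with | cons _ _ h => exact ⟨h, rfl⟩
    have hs : s = s0 := by cases hr; rfl
    subst hs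
    rw [loopB, loopA]
    cases h2 : (dictOf grid).get? (s + 1) with
    | none =>
      have hfnone : movesB.find? (fun dd =>
          decide (0 ≤ pos.1 + dd.1) && decide (pos.1 + dd.1 < (grid.length : Int)) &&
          decide (0 ≤ pos.2 + dd.2) && decide (pos.2 + dd.2 < (grid.length : Int)) &&
          (PySem.List.pyGetD (PySem.List.pyGetD grid (pos.1 + dd.1) []) (pos.2 + dd.2) 0 == s + 1)) = none := by
        rw [List.find?_eq_none]
        intro dd _
        rw [Bool.not_eq_true]
        by_contra hp
        rw [Bool.not_eq_false] at hp
        have hcell := (predB_iff grid s (pos.1 + dd.1, pos.2 + dd.2)).1 hp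
        have := get?_foldl_mem (cellsOf grid) PySem.Dict.empty
          (s + 1, pos.1 + dd.1, pos.2 + dd.2) hcell hvnd
        rw [show (dictOf grid) = (cellsOf grid).foldl (fun d c => d.insert c.1 c.2) PySem.Dict.empty from rfl, this] at h2
        cases h2
      rw [hfnone]
    | some p2 =>
      have hcell2 : (s + 1, p2) ∈ cellsOf grid := get?_dictOf_mem h2
      by_cases hk : KP pos p2
      · -- a matching move exists; whichever move find? picks leads to p2 by distinctness
        obtain ⟨dd0, hdd0, hq1, hq2⟩ := kp_exists_move pos p2 hk
        have hpred0 : ((decide (0 ≤ pos.1 + dd0.1) && decide (pos.1 + dd0.1 < (grid.length : Int)) &&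
            decide (0 ≤ pos.2 + dd0.2) && decide (pos.2 + dd0.2 < (grid.length : Int)) &&
            (PySem.List.pyGetD (PySem.List.pyGetD grid (pos.1 + dd0.1) []) (pos.2 + dd0.2) 0 == s + 1)) = true) := by
          refine (predB_iff grid s (pos.1 + dd0.1, pos.2 + dd0.2)).2 ?_
          rw [← hq1, ← hq2]
          simpa using hcell2
        cases hf : movesB.find? (fun dd =>
            decide (0 ≤ pos.1 + dd.1) && decide (pos.1 + dd.1 < (grid.length : Int)) &&
            decide (0 ≤ pos.2 + dd.2) && decide (pos.2 + dd.2 < (grid.length : Int)) &&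
            (PySem.List.pyGetD (PySem.List.pyGetD grid (pos.1 + dd.1) []) (pos.2 + dd.2) 0 == s + 1)) with
        | none => exact absurd hpred0 (by simpa using List.find?_eq_none.1 hf dd0 hdd0)
        | some dd =>
          have hpred := List.find?_some hf
          have hcell := (predB_iff grid s (pos.1 + dd.1, pos.2 + dd.2)).1 hpred
          have hget := get?_foldl_mem (cellsOf grid) PySem.Dict.empty
            (s + 1, pos.1 + dd.1, pos.2 + dd.2) hcell hvnd
          have hp2 : (pos.1 + dd.1, pos.2 + dd.2) = p2 := by
            rw [show (dictOf grid) = (cellsOf grid).foldl (fun d c => d.insert c.1 c.2) PySem.Dict.empty from rfl, hget] at h2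
            exact Option.some.inj h2
          rw [hpos]
          have hb : (!((|pos.1 - p2.1| == 2 && |pos.2 - p2.2| == 1) ||
              (|pos.1 - p2.1| == 1 && |pos.2 - p2.2| == 2))) = false := by
            simp only [KP] at hk
            simp only [Bool.not_eq_false', Bool.or_eq_true, Bool.and_eq_true, beq_iff_eq]
            tauto
          simp only [hb, Bool.false_eq_true, if_false]
          rw [hp2]
          exact ih (s + 1) p2 hr' h2
      · -- no knight step: A's check fails; B's find? cannot succeed either
        have hfnone : movesB.find? (fun dd =>
            decide (0 ≤ pos.1 + dd.1) && decide (pos.1 + dd.1 < (grid.length : Int)) &&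
            decide (0 ≤ pos.2 + dd.2) && decide (pos.2 + dd.2 < (grid.length : Int)) &&
            (PySem.List.pyGetD (PySem.List.pyGetD grid (pos.1 + dd.1) []) (pos.2 + dd.2) 0 == s + 1)) = none := by
          cases hf : movesB.find? (fun dd =>
              decide (0 ≤ pos.1 + dd.1) && decide (pos.1 + dd.1 < (grid.length : Int)) &&
              decide (0 ≤ pos.2 + dd.2) && decide (pos.2 + dd.2 < (grid.length : Int)) &&
              (PySem.List.pyGetD (PySem.List.pyGetD grid (pos.1 + dd.1) []) (pos.2 + dd.2) 0 == s + 1)) with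
          | none => rfl
          | some dd =>
            have hpred := List.find?_some hf
            have hcell := (predB_iff grid s (pos.1 + dd.1, pos.2 + dd.2)).1 hpred
            have hget := get?_foldl_mem (cellsOf grid) PySem.Dict.empty
              (s + 1, pos.1 + dd.1, pos.2 + dd.2) hcell hvnd
            have hp2 : (pos.1 + dd.1, pos.2 + dd.2) = p2 := by
              rw [show (dictOf grid) = (cellsOf grid).foldl (fun d c => d.insert c.1 c.2) PySem.Dict.empty from rfl, hget] at h2
              exact Option.some.inj h2
            have := kp_of_move dd (List.mem_of_find?_eq_some hf) pos
            rw [hp2] at this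
            exact absurd this hk
        rw [hfnone, hpos]
        have hb : (!((|pos.1 - p2.1| == 2 && |pos.2 - p2.2| == 1) ||
            (|pos.1 - p2.1| == 1 && |pos.2 - p2.2| == 2))) = true := by
          simp only [KP] at hk
          simp only [Bool.not_eq_true', Bool.or_eq_false_iff, Bool.and_eq_false_iff,
            beq_eq_false_iff_ne, ne_eq]
          tauto
        simp only [hb, if_true]

lemma isRange_pyRange (a b : Int) : IsRange a (PySem.List.pyRange a b 1) := by
  generalize h : (b - a).toNat = k
  induction k generalizing a with
  | zero =>
    rw [PySem.List.pyRange_one_eq_nil (by omega)]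
    exact IsRange.nil a
  | succ k ih =>
    rw [PySem.List.pyRange_one_cons (by omega)]
    exact IsRange.cons _ _ (ih (a + 1) (by omega))

-- ===== VERDICT (by name: the statement is the Claim_ definition above) =====
theorem checkValidGrid_spec : Claim_equal_checkValidGrid := by
  intro grid _ hpre
  unfold Spec_checkValidGrid
  have hn : 0 < grid.length := List.length_pos_iff.2 hpre.1
  have hd : (PySem.List.pyRange 0 (grid.length : Int) 1).foldl (fun d i =>
      (PySem.List.pyRange 0 (grid.length : Int) 1).foldl (fun d j =>
        d.insert (PySem.List.pyGetD (PySem.List.pyGetD grid i []) j 0) (i, j)) d)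
      PySem.Dict.empty = dictOf grid := by
    unfold dictOf cellsOf
    rw [List.foldl_flatMap]
    simp only [PySem.List.pyRange_zero_natCast, List.foldl_map, PySem.List.pyGetD_natCast]
  simp only [checkValidGrid, checkValidGrid_alt, hd]
  split_ifs with hg
  · rfl
  · rw [not_not] at hg
    have hg0 : (grid.getD 0 []).getD 0 0 = 0 := by
      simpa [PySem.List.pyGetD_zero] using hg
    have hcell0 : ((0 : Int), (0 : Int), (0 : Int)) ∈ cellsOf grid :=
      mem_cellsOf.2 ⟨0, hn, 0, hn, by rw [hg0]; simp⟩
    have hmem0 : (0 : Int) ∈ (cellsOf grid).map (·.1) := List.mem_map.2 ⟨_, hcell0, rfl⟩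
    -- presence of 1..n²-1 from either loop succeeding gives Nodup, hence the loops agree
    have key : ∀ hsub : (∀ s ∈ PySem.List.pyRange 0 ((grid.length : Int) * grid.length - 1) 1,
          (s + 1) ∈ (cellsOf grid).map (·.1)),
        loopB grid (grid.length : Int) (0, 0) (PySem.List.pyRange 0 ((grid.length : Int) * grid.length - 1) 1) =
        loopA (dictOf grid) (PySem.List.pyRange 0 ((grid.length : Int) * grid.length - 1) 1) := by
      intro hsub
      have hvnd : ((cellsOf grid).map (·.1)).Nodup := by
        apply nodup_vals
        intro k hk
        cases k with
        | zero => exact hmem0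
        | succ j =>
          have hjm : (j : Int) ∈ PySem.List.pyRange 0 ((grid.length : Int) * grid.length - 1) 1 := by
            rw [PySem.List.mem_pyRange_one]
            constructor
            · positivity
            · have : (j : Int) + 1 < ((grid.length * grid.length : Nat) : Int) := by
                exact_mod_cast hk
              push_cast at this ⊢
              omega
          have := hsub _ hjm
          rwa [show ((j + 1 : Nat) : Int) = (j : Int) + 1 by push_cast; ring]
      have hget0 : (dictOf grid).get? 0 = some (0, 0) :=
        get?_foldl_mem (cellsOf grid) PySem.Dict.empty ((0 : Int), (0 : Int), (0 : Int)) hcell0 hvnd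
      exact loopB_eq_loopA grid hvnd _ 0 (0, 0)
        (isRange_pyRange 0 ((grid.length : Int) * grid.length - 1)) hget0
    cases hA : loopA (dictOf grid) (PySem.List.pyRange 0 ((grid.length : Int) * grid.length - 1) 1) with
    | true =>
      have hsub : ∀ s ∈ PySem.List.pyRange 0 ((grid.length : Int) * grid.length - 1) 1,
          (s + 1) ∈ (cellsOf grid).map (·.1) := by
        intro s hs
        obtain ⟨p1, p2, _, hg2, _⟩ := (loopA_iff _ _).1 hA s hs
        exact List.mem_map.2 ⟨_, get?_dictOf_mem hg2, rfl⟩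
      rw [key hsub, hA]
    | false =>
      cases hB : loopB grid (grid.length : Int) (0, 0)
          (PySem.List.pyRange 0 ((grid.length : Int) * grid.length - 1) 1) with
      | false => rfl
      | true =>
        have := key (fun s hs => loopB_mem grid _ (0, 0) hB s hs)
        rw [hA, hB] at this
        cases this
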